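-- pv_equiv track=rewrite | github.com/Maja7/dstgLabirint | nikola/maze.py | _get_orijent
-- ===== SOURCE A (Python) =====
-- def _get_orijent(solution_maze1):
--     orijentacija = {}
--     beg = ''
--     diff = solution_maze1[0] - solution_maze1[1]
--     if diff == -1:
--         beg = 'W'
--         orijentacija[solution_maze1[0]] = 'WE'
--     elif diff == 1:
--         beg = 'E'
--         orijentacija[solution_maze1[0]] = 'EW'
--     elif diff > 1:
--         beg = 'S'
--         orijentacija[solution_maze1[0]] = 'SN'
--     else:
--         beg = 'N'
--         orijentacija[solution_maze1[0]] = 'NS'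
--     for pos in range(1, len(solution_maze1) - 1):  #barem 2 elementa
--         diff = solution_maze1[pos] - solution_maze1[pos + 1]
--         if diff > 1:
--             orijentacija[solution_maze1[pos]] = beg + 'N'
--             beg = 'S'
--         elif diff == 1:
--             orijentacija[solution_maze1[pos]] = beg + 'W'
--             beg = 'E'
--         elif diff == -1:
--             orijentacija[solution_maze1[pos]] = beg + 'E'
--             beg = 'W'
--         else:
--             orijentacija[solution_maze1[pos]] = beg + 'S'
--             beg = 'N'
--     if beg == 'S':
--         orijentacija[solution_maze1[-1]] = 'SN'
--     elif beg == 'N':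
--         orijentacija[solution_maze1[-1]] = 'NS'
--     elif beg == 'E':
--         orijentacija[solution_maze1[-1]] = 'EW'
--     else:
--         orijentacija[solution_maze1[-1]] = 'WE'
--     return orijentacija
-- ===== SOURCE B (Python) =====
-- def _get_orijent(solution_maze1):
--     def letter(d):
--         if d > 1:
--             return 'N'
--         if d == 1:
--             return 'W'
--         if d == -1:
--             return 'E'
--         return 'S'
--
--     def opp(c):
--         if c == 'N':
--             return 'S'
--         if c == 'S':
--             return 'N'
--         if c == 'E':
--             return 'W'
--         return 'E'
--
--     n = len(solution_maze1)
--     moves = [letter(solution_maze1[i] - solution_maze1[i + 1]) for i in range(n - 1)]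
--     orijentacija = {}
--     orijentacija[solution_maze1[0]] = opp(moves[0]) + moves[0]
--     for i in range(1, n - 1):
--         orijentacija[solution_maze1[i]] = opp(moves[i - 1]) + moves[i]
--     e = opp(moves[-1])
--     orijentacija[solution_maze1[-1]] = e + opp(e)
--     return orijentacija
-- ===== Notes on version B (the rewrite author's own statement) =====
-- stated objective: simpler
-- what changed: Replaces the branchy state machine threading a 'beg' carry through three separate if-cascades by a precomputed list of move letters plus an opp() involution, so each cell's label is opp(previous move)+current move computed independently.
-- outside the precondition, e.g. on _get_orijent([1]): A raises IndexError, B raises IndexError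
import Mathlib
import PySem

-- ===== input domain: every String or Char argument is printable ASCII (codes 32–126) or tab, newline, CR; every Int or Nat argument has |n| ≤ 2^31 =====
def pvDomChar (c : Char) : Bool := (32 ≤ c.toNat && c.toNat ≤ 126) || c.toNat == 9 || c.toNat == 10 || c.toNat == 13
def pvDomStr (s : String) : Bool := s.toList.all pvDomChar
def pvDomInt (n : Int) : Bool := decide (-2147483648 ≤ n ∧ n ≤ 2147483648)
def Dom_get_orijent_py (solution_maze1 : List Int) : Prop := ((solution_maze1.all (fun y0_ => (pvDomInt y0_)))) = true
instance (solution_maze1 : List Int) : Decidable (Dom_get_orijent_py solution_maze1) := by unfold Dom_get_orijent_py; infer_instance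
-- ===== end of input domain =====

-- B replaces A's carried-state branch cascades by a precomputed move-letter list and an opp() involution; objective: simpler.
-- A raises IndexError when the path has fewer than 2 cells; B raises there too (Pre_ excludes those inputs).

-- ===== PORT A =====
-- s[i] ported as pyGet? with a junk default 0: Pre_ guarantees every access is in range.
def get_orijent_py (solution_maze1 : List Int) : List (Int × String) :=
  let g : Int → Int := fun i => (PySem.List.pyGet? solution_maze1 i).getD 0
  let diff0 := g 0 - g 1
  let p0 : String × PySem.Dict Int String :=
    if diff0 = -1 then ("W", PySem.Dict.insert PySem.Dict.empty (g 0) "WE")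
    else if diff0 = 1 then ("E", PySem.Dict.insert PySem.Dict.empty (g 0) "EW")
    else if diff0 > 1 then ("S", PySem.Dict.insert PySem.Dict.empty (g 0) "SN")
    else ("N", PySem.Dict.insert PySem.Dict.empty (g 0) "NS")
  let p := (PySem.List.pyRange 1 ((solution_maze1.length : Int) - 1) 1).foldl
    (fun (st : String × PySem.Dict Int String) pos =>
      let diff := g pos - g (pos + 1)
      if diff > 1 then ("S", st.2.insert (g pos) (st.1 ++ "N"))
      else if diff = 1 then ("E", st.2.insert (g pos) (st.1 ++ "W"))
      else if diff = -1 then ("W", st.2.insert (g pos) (st.1 ++ "E"))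
      else ("N", st.2.insert (g pos) (st.1 ++ "S"))) p0
  let d :=
    if p.1 = "S" then p.2.insert (g (-1)) "SN"
    else if p.1 = "N" then p.2.insert (g (-1)) "NS"
    else if p.1 = "E" then p.2.insert (g (-1)) "EW"
    else p.2.insert (g (-1)) "WE"
  d.items

-- ===== PORT B =====
def pvLetter (d : Int) : String :=
  if d > 1 then "N" else if d = 1 then "W" else if d = -1 then "E" else "S"

def pvOpp (c : String) : String :=
  if c = "N" then "S" else if c = "S" then "N" else if c = "E" then "W" else "E"

def get_orijent_py_alt (solution_maze1 : List Int) : List (Int × String) :=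
  let g : Int → Int := fun i => (PySem.List.pyGet? solution_maze1 i).getD 0
  let n : Int := solution_maze1.length
  let moves : List String := (PySem.List.pyRange 0 (n - 1) 1).map (fun i => pvLetter (g i - g (i + 1)))
  let m : Int → String := fun i => (PySem.List.pyGet? moves i).getD ""
  let d0 := PySem.Dict.insert (PySem.Dict.empty) (g 0) (pvOpp (m 0) ++ m 0)
  let d1 := (PySem.List.pyRange 1 (n - 1) 1).foldl
      (fun (d : PySem.Dict Int String) i => d.insert (g i) (pvOpp (m (i - 1)) ++ m i)) d0
  let e := pvOpp (m (-1))
  (d1.insert (g (-1)) (e ++ pvOpp e)).items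

-- ===== PRECONDITION & SPEC =====
-- Pre_ excludes paths of fewer than 2 cells: there A raises IndexError on solution_maze1[1] (and so does B).
def Pre_get_orijent_py (solution_maze1 : List Int) : Prop := 2 ≤ solution_maze1.length
instance (solution_maze1 : List Int) : Decidable (Pre_get_orijent_py solution_maze1) := by unfold Pre_get_orijent_py; infer_instance
def pvWitness_get_orijent_py : List Int := [3, 4, 5, 1]

def Spec_get_orijent_py (solution_maze1 : List Int) (out : List (Int × String)) : Prop := out = get_orijent_py_alt solution_maze1
instance (solution_maze1 : List Int) (out : List (Int × String)) : Decidable (Spec_get_orijent_py solution_maze1 out) := by unfold Spec_get_orijent_py; infer_instance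

-- ===== CLAIM (what is proved, stated in full; the proofs are below) =====
def Claim_equal_get_orijent_py : Prop := ∀ (solution_maze1 : List Int), Dom_get_orijent_py solution_maze1 → Pre_get_orijent_py solution_maze1 → Spec_get_orijent_py solution_maze1 (get_orijent_py solution_maze1)

-- ===== LEMMAS AND PROOFS =====

-- A's loop body, rewritten through pvLetter/pvOpp
lemma stepA_eq (g : Int → Int) (beg : String) (d : PySem.Dict Int String) (pos : Int) :
    (let diff := g pos - g (pos + 1)
     if diff > 1 then (("S" : String), d.insert (g pos) (beg ++ "N"))
     else if diff = 1 then ("E", d.insert (g pos) (beg ++ "W"))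
     else if diff = -1 then ("W", d.insert (g pos) (beg ++ "E"))
     else ("N", d.insert (g pos) (beg ++ "S")))
    = (pvOpp (pvLetter (g pos - g (pos + 1))), d.insert (g pos) (beg ++ pvLetter (g pos - g (pos + 1)))) := by
  show _ = _
  by_cases h1 : g pos - g (pos + 1) > 1
  · simp [h1, pvLetter, pvOpp]
  · by_cases h2 : g pos - g (pos + 1) = 1
    · simp [h2, pvLetter, pvOpp]
    · by_cases h3 : g pos - g (pos + 1) = -1
      · simp [h3, pvLetter, pvOpp]
      · simp [h1, h2, h3, pvLetter, pvOpp]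

-- the central loop invariant: A's fold with beg = pvOpp (F (a-1)) equals B's fold, ending with beg = pvOpp (F (a+k-1))
lemma loop_eq (g : Int → Int) (F : Int → String) (hF : ∀ i, F i = pvLetter (g i - g (i + 1))) :
    ∀ (k : Nat) (a : Int) (d : PySem.Dict Int String),
    (PySem.List.pyRange a (a + k) 1).foldl
      (fun (st : String × PySem.Dict Int String) pos =>
        let diff := g pos - g (pos + 1)
        if diff > 1 then (("S" : String), st.2.insert (g pos) (st.1 ++ "N"))
        else if diff = 1 then ("E", st.2.insert (g pos) (st.1 ++ "W"))
        else if diff = -1 then ("W", st.2.insert (g pos) (st.1 ++ "E"))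
        else ("N", st.2.insert (g pos) (st.1 ++ "S"))) (pvOpp (F (a - 1)), d)
    = (pvOpp (F (a + k - 1)),
       (PySem.List.pyRange a (a + k) 1).foldl
         (fun (d : PySem.Dict Int String) i => d.insert (g i) (pvOpp (F (i - 1)) ++ F i)) d) := by
  intro k
  induction k with
  | zero =>
    intro a d
    rw [PySem.List.pyRange_one_eq_nil (by omega)]
    simp
  | succ k ih =>
    intro a d
    rw [PySem.List.pyRange_one_cons (by omega)]
    simp only [List.foldl_cons]
    rw [stepA_eq, ← hF a]
    push_cast
    have h1 : a + ((k : Int) + 1) = a + 1 + (k : Int) := by ring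
    rw [h1]
    have ih' := ih (a + 1) (PySem.Dict.insert d (g a) (pvOpp (F (a - 1)) ++ F a))
    norm_num at ih' ⊢
    exact ih'

-- the dict-insert range of pvOpp is the four direction letters
lemma pvOpp_cases (c : String) : pvOpp c = "S" ∨ pvOpp c = "N" ∨ pvOpp c = "W" ∨ pvOpp c = "E" := by
  unfold pvOpp; split_ifs <;> simp

-- A's first branch cascade, rewritten through pvLetter/pvOpp
lemma firstA_eq (g : Int → Int) :
    (if g 0 - g 1 = -1 then (("W" : String), PySem.Dict.insert PySem.Dict.empty (g 0) "WE")
     else if g 0 - g 1 = 1 then ("E", PySem.Dict.insert PySem.Dict.empty (g 0) "EW")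
     else if g 0 - g 1 > 1 then ("S", PySem.Dict.insert PySem.Dict.empty (g 0) "SN")
     else ("N", PySem.Dict.insert PySem.Dict.empty (g 0) "NS"))
    = (pvOpp (pvLetter (g 0 - g 1)),
       PySem.Dict.insert PySem.Dict.empty (g 0) (pvOpp (pvLetter (g 0 - g 1)) ++ pvLetter (g 0 - g 1))) := by
  by_cases h1 : g 0 - g 1 = -1
  · simp [h1, pvLetter, pvOpp]
  · by_cases h2 : g 0 - g 1 = 1
    · simp [h2, pvLetter, pvOpp]
    · by_cases h3 : g 0 - g 1 > 1
      · simp [h1, h2, h3, pvLetter, pvOpp]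
      · simp [h1, h2, h3, pvLetter, pvOpp]

-- A's last branch cascade, rewritten as e ++ pvOpp e
lemma lastA_eq (e : String) (he : e = "S" ∨ e = "N" ∨ e = "W" ∨ e = "E")
    (d : PySem.Dict Int String) (k : Int) :
    (if e = "S" then d.insert k "SN"
     else if e = "N" then d.insert k "NS"
     else if e = "E" then d.insert k "EW"
     else d.insert k "WE")
    = d.insert k (e ++ pvOpp e) := by
  rcases he with h | h | h | h <;> simp [h, pvOpp]

-- the two port bodies agree for any index-reading function g, once 2 ≤ nn
lemma main_eq (g : Int → Int) (nn : Nat) (hpre : 2 ≤ nn) :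
    (let diff0 := g 0 - g 1
     let p0 : String × PySem.Dict Int String :=
       if diff0 = -1 then ("W", PySem.Dict.insert PySem.Dict.empty (g 0) "WE")
       else if diff0 = 1 then ("E", PySem.Dict.insert PySem.Dict.empty (g 0) "EW")
       else if diff0 > 1 then ("S", PySem.Dict.insert PySem.Dict.empty (g 0) "SN")
       else ("N", PySem.Dict.insert PySem.Dict.empty (g 0) "NS")
     let p := (PySem.List.pyRange 1 ((nn : Int) - 1) 1).foldl
       (fun (st : String × PySem.Dict Int String) pos =>
         let diff := g pos - g (pos + 1)
         if diff > 1 then ("S", st.2.insert (g pos) (st.1 ++ "N"))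
         else if diff = 1 then ("E", st.2.insert (g pos) (st.1 ++ "W"))
         else if diff = -1 then ("W", st.2.insert (g pos) (st.1 ++ "E"))
         else ("N", st.2.insert (g pos) (st.1 ++ "S"))) p0
     let d :=
       if p.1 = "S" then p.2.insert (g (-1)) "SN"
       else if p.1 = "N" then p.2.insert (g (-1)) "NS"
       else if p.1 = "E" then p.2.insert (g (-1)) "EW"
       else p.2.insert (g (-1)) "WE"
     d.items)
    =
    (let moves : List String := (PySem.List.pyRange 0 ((nn : Int) - 1) 1).map
        (fun i => pvLetter (g i - g (i + 1)))
     let m : Int → String := fun i => PySem.List.pyGetD moves i ""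
     let d0 := PySem.Dict.insert (PySem.Dict.empty) (g 0) (pvOpp (m 0) ++ m 0)
     let d1 := (PySem.List.pyRange 1 ((nn : Int) - 1) 1).foldl
         (fun (d : PySem.Dict Int String) i => d.insert (g i) (pvOpp (m (i - 1)) ++ m i)) d0
     let e := pvOpp (m (-1))
     (d1.insert (g (-1)) (e ++ pvOpp e)).items) := by
  have hm : ∀ j : Int, 0 ≤ j → j < (nn : Int) - 1 →
      PySem.List.pyGetD ((PySem.List.pyRange 0 ((nn : Int) - 1) 1).map
        (fun i => pvLetter (g i - g (i + 1)))) j ""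
      = pvLetter (g j - g (j + 1)) := by
    intro j h0 h1
    exact PySem.List.pyGetD_map_pyRange_of_nonneg _ _ _ _ h0 h1
  have hlen : ((PySem.List.pyRange 0 ((nn : Int) - 1) 1).map
      (fun i => pvLetter (g i - g (i + 1)))).length = nn - 1 := by
    rw [List.length_map, PySem.List.length_pyRange_one]; omega
  have hmlast : PySem.List.pyGetD ((PySem.List.pyRange 0 ((nn : Int) - 1) 1).map
        (fun i => pvLetter (g i - g (i + 1)))) (-1) ""
      = pvLetter (g ((nn : Int) - 2) - g ((nn : Int) - 2 + 1)) := by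
    rw [PySem.List.pyGetD_neg_ofNat _ 1 _ (by omega) (by rw [hlen]; omega)]
    rw [List.getElem_map, PySem.List.getElem_pyRange_one]
    have h2 : (0 : Int) + (((((PySem.List.pyRange 0 ((nn : Int) - 1) 1).map
        (fun i => pvLetter (g i - g (i + 1)))).length - 1 : Nat)) : Int) = (nn : Int) - 2 := by
      rw [hlen]; omega
    rw [h2]
  simp only []
  rw [firstA_eq]
  -- B side: replace every moves-lookup by the move letter itself
  rw [hm 0 le_rfl (by omega), hmlast]
  have hB : ∀ (init : PySem.Dict Int String),
      List.foldl (fun (d : PySem.Dict Int String) i => d.insert (g i)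
          (pvOpp (PySem.List.pyGetD ((PySem.List.pyRange 0 ((nn : Int) - 1) 1).map
              (fun i => pvLetter (g i - g (i + 1)))) (i - 1) "")
            ++ PySem.List.pyGetD ((PySem.List.pyRange 0 ((nn : Int) - 1) 1).map
              (fun i => pvLetter (g i - g (i + 1)))) i ""))
        init (PySem.List.pyRange 1 ((nn : Int) - 1) 1)
      = List.foldl (fun (d : PySem.Dict Int String) i => d.insert (g i)
          (pvOpp (pvLetter (g (i - 1) - g (i - 1 + 1))) ++ pvLetter (g i - g (i + 1))))
        init (PySem.List.pyRange 1 ((nn : Int) - 1) 1) := by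
    intro init
    refine PySem.List.foldl_congr_mem _ _ _ _ ?_
    intro acc i hi
    rw [PySem.List.mem_pyRange_one] at hi
    rw [hm (i - 1) (by omega) (by omega), hm i (by omega) (by omega)]
  rw [hB]
  -- A side: run the loop invariant
  have hstart : pvOpp (pvLetter (g 0 - g 1))
      = pvOpp ((fun i => pvLetter (g i - g (i + 1))) (1 - 1)) := by norm_num
  rw [hstart]
  have hsplit : ((nn : Int) - 1) = 1 + ((nn - 2 : Nat) : Int) := by omega
  rw [hsplit]
  rw [loop_eq g (fun i => pvLetter (g i - g (i + 1))) (fun _ => rfl) (nn - 2) 1]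
  simp only []
  rw [lastA_eq _ (pvOpp_cases _)]
  have hX : (1 : Int) + ((nn - 2 : Nat) : Int) - 1 = (nn : Int) - 2 := by omega
  rw [hX]
  norm_num

theorem get_orijent_py_spec : Claim_equal_get_orijent_py := by
  intro s _ hpre
  unfold Pre_get_orijent_py at hpre
  show get_orijent_py s = get_orijent_py_alt s
  exact main_eq (fun i => PySem.List.pyGetD s i 0) s.length hpre
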